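-- pv_equiv track=rewrite | github.com/G-Gromko/GG_praca_inzynierska | code/staff_detection.py | get_staves_positions
-- ===== SOURCE A (Python) =====
-- def get_staves_positions(x_coord, distance, lines_idx_list = []):
--     if len(lines_idx_list) < 5:
--         return []
--
--     staff_line_positions = []
--     counter = 0
--     aux_dist = lines_idx_list[1] - lines_idx_list[0]
--     flag = aux_dist >= distance - 4 and aux_dist <= distance + 4
--
--     # distance between lines is checked with some slack to help with non-uniform filtering
--     for i in range(1, len(lines_idx_list)):
--         current_dist = lines_idx_list[i] - lines_idx_list[i-1]
--
--         if flag and counter == 4: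
--             counter = 0
--             flag = False
--             staff_line_positions.append([x_coord, (lines_idx_list[i-1] + lines_idx_list[i-5]) // 2])
--         elif current_dist >= distance - 2 and current_dist <= distance + 2 and not flag:
--             counter = 1
--             flag = True
--         elif current_dist >= distance - 2 and current_dist <= distance + 2 and flag:
--             counter += 1
--         elif current_dist < distance - 2 or current_dist > distance + 2:
--             flag = False
--             counter = 0
--
--     if flag and counter == 4:
--         staff_line_positions.append([x_coord, (lines_idx_list[i] + lines_idx_list[i-4]) // 2])
--
--     return staff_line_positions
-- ===== SOURCE B (Python) =====
-- def get_staves_positions(x_coord, distance, lines_idx_list = []):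
--     n = len(lines_idx_list)
--     if n < 5:
--         return []
--     good = [distance - 2 <= lines_idx_list[k+1] - lines_idx_list[k] <= distance + 2
--             for k in range(n - 1)]
--     res = []
--     k = 0
--     while k < n - 1:
--         if not good[k]:
--             k += 1
--             continue
--         j = k
--         while j < n - 1 and good[j]:
--             j += 1
--         # maximal run of good gaps covers lines k..j; it holds (j-k+1)//5 staves
--         for t in range((j - k + 1) // 5):
--             res.append([x_coord, (lines_idx_list[k + 5*t] + lines_idx_list[k + 5*t + 4]) // 2])
--         k = j + 1
--     return res
-- ===== Notes on version B (the rewrite author's own statement) =====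
-- stated objective: alternative
-- what changed: Replaced the counter/flag state machine with deferred emission by a precomputed gap-goodness table plus a run-length walk: each maximal run of good gaps covering L lines emits L//5 staves at stride 5 directly.
import Mathlib
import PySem

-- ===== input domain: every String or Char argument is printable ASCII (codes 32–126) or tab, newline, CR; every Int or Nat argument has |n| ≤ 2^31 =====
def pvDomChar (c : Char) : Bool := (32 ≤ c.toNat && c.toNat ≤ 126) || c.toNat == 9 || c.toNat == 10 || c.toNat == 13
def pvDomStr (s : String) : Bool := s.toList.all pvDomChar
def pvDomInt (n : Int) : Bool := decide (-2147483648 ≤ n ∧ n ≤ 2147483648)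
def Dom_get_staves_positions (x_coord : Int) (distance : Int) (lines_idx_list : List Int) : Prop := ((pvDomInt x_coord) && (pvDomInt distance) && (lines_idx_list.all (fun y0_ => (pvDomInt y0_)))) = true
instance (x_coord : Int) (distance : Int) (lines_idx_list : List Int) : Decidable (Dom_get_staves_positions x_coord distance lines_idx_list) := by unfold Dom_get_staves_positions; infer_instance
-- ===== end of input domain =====

-- B replaces A's counter/flag state machine by a goodness table plus a run-length walk
-- (same task, different decomposition; same O(n) cost). All list indices both programs use
-- are nonnegative and in range, so plain List.getD is an exact port of Python's indexing here;
-- Python's '//' on possibly negative ints is ported as PySem.Int.floordiv.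

-- ===== PORT A =====
-- one iteration of A's for-loop (i is Python's loop index, 1 ≤ i < len)
def pvAStep (x_coord distance : Int) (L : List Int) (i : Nat)
    (counter : Nat) (flag : Bool) (acc : List (List Int)) :
    Nat × Bool × List (List Int) :=
  let current_dist := L.getD i 0 - L.getD (i - 1) 0
  if flag && counter == 4 then
    (0, false, acc ++ [[x_coord, PySem.Int.floordiv (L.getD (i - 1) 0 + L.getD (i - 5) 0) 2]])
  else if (decide (distance - 2 ≤ current_dist) && decide (current_dist ≤ distance + 2)) && !flag then
    (1, true, acc)
  else if (decide (distance - 2 ≤ current_dist) && decide (current_dist ≤ distance + 2)) && flag then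
    (counter + 1, flag, acc)
  else if decide (current_dist < distance - 2) || decide (distance + 2 < current_dist) then
    (0, false, acc)
  else
    (counter, flag, acc)

-- A's for-loop "for i in range(1, len)" as the obvious recursion on i
def pvALoop (x_coord distance : Int) (L : List Int) (i : Nat)
    (counter : Nat) (flag : Bool) (acc : List (List Int)) :
    Nat × Bool × List (List Int) :=
  if _h : i < L.length then
    let s := pvAStep x_coord distance L i counter flag acc
    pvALoop x_coord distance L (i + 1) s.1 s.2.1 s.2.2
  else (counter, flag, acc)
termination_by L.length - i

-- A's trailing "if flag and counter == 4" (Python's i is len-1 there)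
def pvAPost (x_coord : Int) (L : List Int) (r : Nat × Bool × List (List Int)) : List (List Int) :=
  if r.2.1 && r.1 == 4 then
    r.2.2 ++ [[x_coord, PySem.Int.floordiv (L.getD (L.length - 1) 0 + L.getD (L.length - 5) 0) 2]]
  else r.2.2

def get_staves_positions (x_coord : Int) (distance : Int) (lines_idx_list : List Int) : List (List Int) :=
  if lines_idx_list.length < 5 then []
  else
    let aux_dist := lines_idx_list.getD 1 0 - lines_idx_list.getD 0 0
    let flag0 := decide (distance - 4 ≤ aux_dist) && decide (aux_dist ≤ distance + 4)
    pvAPost x_coord lines_idx_list (pvALoop x_coord distance lines_idx_list 1 0 flag0 [])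

-- ===== PORT B =====
-- B's boolean gap-goodness table: good[k] ↔ distance-2 ≤ L[k+1]-L[k] ≤ distance+2
def pvGoodTable (distance : Int) (L : List Int) : List Bool :=
  (List.range (L.length - 1)).map (fun k =>
    decide (distance - 2 ≤ L.getD (k + 1) 0 - L.getD k 0) &&
    decide (L.getD (k + 1) 0 - L.getD k 0 ≤ distance + 2))

-- a getD of a Bool list that returns true is in range (cited by the termination proofs)
theorem pvGetD_true_lt (G : List Bool) (k : Nat) (h : G.getD k false = true) : k < G.length := by
  by_contra hk
  simp [List.getD, List.getElem?_eq_none (Nat.le_of_not_lt hk)] at h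

-- B's inner while loop: advance j while the gap is good
def pvRunEnd (G : List Bool) (j : Nat) : Nat :=
  if G.getD j false then pvRunEnd G (j + 1) else j
termination_by G.length - j
decreasing_by have := pvGetD_true_lt G j (by assumption); omega

theorem pvRunEnd_ge (G : List Bool) (j : Nat) : j ≤ pvRunEnd G j := by
  rw [pvRunEnd]
  split
  · have := pvRunEnd_ge G (j + 1); omega
  · exact Nat.le_refl j
termination_by G.length - j
decreasing_by have := pvGetD_true_lt G j (by assumption); omega

-- B's outer while loop: skip bad gaps, emit (run_lines//5) staves per maximal run
def pvBWalk (x_coord : Int) (L : List Int) (G : List Bool) (k : Nat)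
    (acc : List (List Int)) : List (List Int) :=
  if _h : k < G.length then
    if G.getD k false then
      let j := pvRunEnd G k
      pvBWalk x_coord L G (j + 1)
        (acc ++ (List.range ((j - k + 1) / 5)).map (fun t =>
          [x_coord, PySem.Int.floordiv (L.getD (k + 5 * t) 0 + L.getD (k + 5 * t + 4) 0) 2]))
    else pvBWalk x_coord L G (k + 1) acc
  else acc
termination_by G.length - k
decreasing_by
  · have := pvRunEnd_ge G k; omega
  · omega

def get_staves_positions_alt (x_coord : Int) (distance : Int) (lines_idx_list : List Int) : List (List Int) :=
  if lines_idx_list.length < 5 then []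
  else pvBWalk x_coord lines_idx_list (pvGoodTable distance lines_idx_list) 0 []

-- ===== PRECONDITION & SPEC =====
def Spec_get_staves_positions (x_coord : Int) (distance : Int) (lines_idx_list : List Int) (out : List (List Int)) : Prop := out = get_staves_positions_alt x_coord distance lines_idx_list
instance (x_coord : Int) (distance : Int) (lines_idx_list : List Int) (out : List (List Int)) : Decidable (Spec_get_staves_positions x_coord distance lines_idx_list out) := by unfold Spec_get_staves_positions; infer_instance

-- ===== CLAIM (what is proved, stated in full; the proofs are below) =====
def Claim_equal_get_staves_positions : Prop := ∀ (x_coord : Int) (distance : Int) (lines_idx_list : List Int), Dom_get_staves_positions x_coord distance lines_idx_list → Spec_get_staves_positions x_coord distance lines_idx_list (get_staves_positions x_coord distance lines_idx_list)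

-- ===== LEMMAS AND PROOFS =====

-- length of a maximal run of good gaps starting at k
def pvRunlen (G : List Bool) (k : Nat) : Nat :=
  if G.getD k false then pvRunlen G (k + 1) + 1 else 0
termination_by G.length - k
decreasing_by have := pvGetD_true_lt G k (by assumption); omega

-- T staves starting at line s, stride 5
def pvStaves (x_coord : Int) (L : List Int) (s : Nat) (T : Nat) : List (List Int) :=
  (List.range T).map (fun t =>
    [x_coord, PySem.Int.floordiv (L.getD (s + 5 * t) 0 + L.getD (s + 5 * t + 4) 0) 2])

-- the common specification both programs compute: walk runs, emit ⌊(r+1)/5⌋ staves per run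
def pvS (x_coord : Int) (L : List Int) (G : List Bool) (k : Nat) : List (List Int) :=
  if G.getD k false then
    pvStaves x_coord L k ((pvRunlen G k + 1) / 5) ++ pvS x_coord L G (k + pvRunlen G k + 1)
  else if k < G.length then pvS x_coord L G (k + 1) else []
termination_by G.length - k
decreasing_by
  · have := pvGetD_true_lt G k (by assumption); omega
  · omega

theorem pvS_stop (x_coord : Int) (L : List Int) (G : List Bool) (k : Nat)
    (h : ¬ k < G.length) : pvS x_coord L G k = [] := by
  have hg : ¬ (G.getD k false = true) := fun hb => h (pvGetD_true_lt G k hb)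
  rw [pvS, if_neg hg, if_neg h]

theorem pvRunlen_false (G : List Bool) (k : Nat) (h : G.getD k false = false) :
    pvRunlen G k = 0 := by rw [pvRunlen, h]; simp

theorem pvRunlen_true (G : List Bool) (k : Nat) (h : G.getD k false = true) :
    pvRunlen G k = pvRunlen G (k + 1) + 1 := by rw [pvRunlen, h]; simp

theorem pvRunlen_stop (G : List Bool) (k : Nat) (h : ¬ k < G.length) : pvRunlen G k = 0 := by
  apply pvRunlen_false
  by_contra hb
  exact h (pvGetD_true_lt G k (by simpa using hb))

theorem pvStaves_succ (x_coord : Int) (L : List Int) (s : Nat) (T : Nat) :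
    pvStaves x_coord L s (T + 1) =
      [x_coord, PySem.Int.floordiv (L.getD s 0 + L.getD (s + 4) 0) 2] ::
        pvStaves x_coord L (s + 5) T := by
  unfold pvStaves
  rw [List.range_succ_eq_map, List.map_cons, List.map_map]
  simp only [Nat.mul_zero, Nat.add_zero]
  congr 1
  apply List.map_congr_left
  intro t _
  simp only [Function.comp_apply, Nat.succ_eq_add_one]
  rw [show s + 5 * (t + 1) = s + 5 + 5 * t from by ring]

-- a fresh restart at k produces exactly pvS k
theorem pvS_fresh (x_coord : Int) (L : List Int) (G : List Bool) (k : Nat) :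
    pvStaves x_coord L k ((pvRunlen G k + 1) / 5) ++ pvS x_coord L G (k + pvRunlen G k + 1)
      = pvS x_coord L G k := by
  by_cases hg : G.getD k false = true
  · conv_rhs => rw [pvS]
    rw [if_pos hg]
  · have hg' : G.getD k false = false := by simpa using hg
    rw [pvRunlen_false G k hg']
    simp only [Nat.zero_add, Nat.add_zero]
    have h05 : (0 + 1) / 5 = 0 := by norm_num
    rw [h05]
    simp only [pvStaves, List.range_zero, List.map_nil, List.nil_append]
    by_cases hk : k < G.length
    · conv_rhs => rw [pvS]
      rw [if_neg hg, if_pos hk]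
    · rw [pvS_stop x_coord L G k hk, pvS_stop]
      omega

theorem pvRunEnd_eq (G : List Bool) (k : Nat) : pvRunEnd G k = k + pvRunlen G k := by
  rw [pvRunEnd]
  by_cases hg : G.getD k false = true
  · rw [pvRunlen_true G k hg, if_pos hg]
    have := pvRunEnd_eq G (k + 1)
    omega
  · have hg' : G.getD k false = false := by simpa using hg
    rw [pvRunlen_false G k hg', if_neg hg]
    omega
termination_by G.length - k
decreasing_by have := pvGetD_true_lt G k (by assumption); omega

-- B's walk accumulates pvS
theorem pvBWalk_eq (x_coord : Int) (L : List Int) (G : List Bool) (k : Nat)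
    (acc : List (List Int)) :
    pvBWalk x_coord L G k acc = acc ++ pvS x_coord L G k := by
  rw [pvBWalk]
  by_cases hk : k < G.length
  · by_cases hg : G.getD k false = true
    · simp only [hk, dif_pos, hg, if_true]
      have hje : pvRunEnd G k = k + pvRunlen G k := pvRunEnd_eq G k
      have hcount : (pvRunEnd G k - k + 1) / 5 = (pvRunlen G k + 1) / 5 := by omega
      have hmap : (List.range ((pvRunEnd G k - k + 1) / 5)).map (fun t =>
            [x_coord, PySem.Int.floordiv (L.getD (k + 5 * t) 0 + L.getD (k + 5 * t + 4) 0) 2])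
          = pvStaves x_coord L k ((pvRunlen G k + 1) / 5) := by
        rw [hcount]; rfl
      rw [hmap, pvBWalk_eq x_coord L G (pvRunEnd G k + 1) _]
      rw [List.append_assoc]
      congr 1
      rw [hje, pvS_fresh]
    · have hg' : G.getD k false = false := by simpa using hg
      simp only [hk, dif_pos, hg', if_false, Bool.false_eq_true]
      rw [pvBWalk_eq x_coord L G (k + 1) acc]
      congr 1
      conv_rhs => rw [pvS]
      rw [if_neg hg, if_pos hk]
  · simp only [hk, dif_neg, not_false_iff]
    rw [pvS_stop x_coord L G k hk, List.append_nil]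
termination_by G.length - k
decreasing_by
  · have := pvRunEnd_ge G k; omega
  · omega

theorem pvGoodTable_length (distance : Int) (L : List Int) :
    (pvGoodTable distance L).length = L.length - 1 := by
  simp [pvGoodTable]

theorem pvGoodTable_getD (distance : Int) (L : List Int) (k : Nat) (hk : k < L.length - 1) :
    (pvGoodTable distance L).getD k false =
      (decide (distance - 2 ≤ L.getD (k + 1) 0 - L.getD k 0) &&
       decide (L.getD (k + 1) 0 - L.getD k 0 ≤ distance + 2)) := by
  simp [pvGoodTable, List.getD, List.getElem?_map, List.getElem?_range, hk]

-- the heart of the proof: A's loop from a state with c already-counted good gaps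
-- (run start line s, next Python index s+c+1) followed by A's post-check produces
-- exactly the staves of the current run and then pvS after it.
theorem pvA_run (x_coord distance : Int) (L : List Int) (s c : Nat) (flag : Bool)
    (acc : List (List Int))
    (hc : c ≤ 4) (hf : 0 < c → flag = true) (hn : s + c + 1 ≤ L.length)
    (hg : ∀ t, t < c → (pvGoodTable distance L).getD (s + t) false = true) :
    pvAPost x_coord L (pvALoop x_coord distance L (s + c + 1) c flag acc)
      = acc ++ pvStaves x_coord L s
            ((c + pvRunlen (pvGoodTable distance L) (s + c) + 1) / 5)
          ++ pvS x_coord L (pvGoodTable distance L) (s + c + pvRunlen (pvGoodTable distance L) (s + c) + 1) := by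
  set G := pvGoodTable distance L with hG
  rw [pvALoop]
  by_cases hi : s + c + 1 < L.length
  · -- loop continues: the gap index is k = s + c < G.length
    have hkG : s + c < G.length := by rw [hG, pvGoodTable_length]; omega
    have hidx : s + c + 1 - 1 = s + c := by omega
    have hgood : G.getD (s + c) false =
        (decide (distance - 2 ≤ L.getD (s + c + 1) 0 - L.getD (s + c) 0) &&
         decide (L.getD (s + c + 1) 0 - L.getD (s + c) 0 ≤ distance + 2)) := by
      rw [hG]; exact pvGoodTable_getD distance L (s + c) (by have := pvGoodTable_length distance L; omega)
    simp only [hi, dif_pos]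
    by_cases hc4 : flag = true ∧ c = 4
    · -- emission step: staff lines s..s+4, gap s+4 consumed, fresh restart at s+5
      obtain ⟨hfl, hce⟩ := hc4
      subst hce
      have hstep : pvAStep x_coord distance L (s + 4 + 1) 4 flag acc =
          (0, false, acc ++ [[x_coord, PySem.Int.floordiv (L.getD (s + 4) 0 + L.getD s 0) 2]]) := by
        unfold pvAStep
        simp only [hfl]
        rw [show s + 4 + 1 - 1 = s + 4 from by omega, show s + 4 + 1 - 5 = s from by omega]
        simp
      rw [hstep]
      have hrec := pvA_run x_coord distance L (s + 5) 0 false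
        (acc ++ [[x_coord, PySem.Int.floordiv (L.getD (s + 4) 0 + L.getD s 0) 2]])
        (by omega) (fun h => absurd h (by omega)) (by omega) (fun t ht => absurd ht (by omega))
      rw [← hG] at hrec
      simp only [Nat.add_zero, Nat.zero_add] at hrec
      rw [show s + 4 + 1 + 1 = s + 5 + 1 from by omega, hrec]
      -- compare with the required run-of-(4+r) form
      by_cases hg4 : G.getD (s + 4) false = true
      · have hr : pvRunlen G (s + 4) = pvRunlen G (s + 5) + 1 := by
          have := pvRunlen_true G (s + 4) hg4; omega
        rw [hr]
        have hcnt : (4 + (pvRunlen G (s + 5) + 1) + 1) / 5 = (pvRunlen G (s + 5) + 1) / 5 + 1 := by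
          omega
        rw [hcnt, pvStaves_succ]
        have haddc : L.getD s 0 + L.getD (s + 4) 0 = L.getD (s + 4) 0 + L.getD s 0 := by ring
        rw [haddc]
        rw [show s + 4 + (pvRunlen G (s + 5) + 1) + 1 = s + 5 + pvRunlen G (s + 5) + 1 from by omega]
        simp [List.append_assoc]
      · have hg4' : G.getD (s + 4) false = false := by simpa using hg4
        rw [pvRunlen_false G (s + 4) hg4']
        have hcnt : (4 + 0 + 1) / 5 = 0 + 1 := by norm_num
        rw [hcnt, pvStaves_succ]
        have haddc : L.getD s 0 + L.getD (s + 4) 0 = L.getD (s + 4) 0 + L.getD s 0 := by ring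
        rw [haddc]
        simp only [pvStaves, List.range_zero, List.map_nil]
        rw [show s + 4 + 0 + 1 = s + 5 from by omega]
        rw [← pvS_fresh x_coord L G (s + 5)]
        simp [List.append_assoc, pvStaves]
    · -- no emission: counter < 4 here
      have hclt : c ≤ 3 := by
        rcases Nat.lt_or_ge c 4 with h | h
        · omega
        · exfalso; exact hc4 ⟨hf (by omega), by omega⟩
      by_cases hgd : G.getD (s + c) false = true
      · -- good gap: counter increments, flag set
        have hstep : pvAStep x_coord distance L (s + c + 1) c flag acc = (c + 1, true, acc) := by
          rw [hgood] at hgd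
          have hcne : (c == 4) = false := by
            simp only [beq_eq_false_iff_ne]
            intro hce
            rcases Bool.eq_false_or_eq_true flag with hfl | hfl
            · exact hc4 ⟨hfl, hce⟩
            · have h2 := hf (by omega); rw [hfl] at h2; exact absurd h2 (by simp)
          simp only [pvAStep, hidx]
          rw [hgd, hcne]
          cases flag with
          | false =>
            have hc0 : c = 0 := by
              by_contra h0
              have := hf (Nat.pos_of_ne_zero h0)
              simp at this
            subst hc0
            simp
          | true => simp
        rw [hstep]
        have hrec := pvA_run x_coord distance L s (c + 1) true acc
          (by omega) (fun _ => rfl) (by omega)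
          (by
            intro t ht
            rcases Nat.lt_or_ge t c with h | h
            · exact hg t h
            · have : t = c := by omega
              subst this; exact hgd)
        rw [← hG] at hrec
        rw [show s + c + 1 + 1 = s + (c + 1) + 1 from by omega]
        rw [hrec]
        have hr : pvRunlen G (s + c) = pvRunlen G (s + c + 1) + 1 := pvRunlen_true G (s + c) hgd
        rw [show s + (c + 1) = s + c + 1 from by omega, hr]
        rw [show c + 1 + pvRunlen G (s + c + 1) + 1 = c + (pvRunlen G (s + c + 1) + 1) + 1 from by omega]
        rw [show s + c + 1 + pvRunlen G (s + c + 1) + 1 = s + c + (pvRunlen G (s + c + 1) + 1) + 1 from by omega]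
      · -- bad gap: reset, fresh restart at s+c+1
        have hgd' : G.getD (s + c) false = false := by simpa using hgd
        have hstep : pvAStep x_coord distance L (s + c + 1) c flag acc = (0, false, acc) := by
          rw [hgood] at hgd'
          have hbad : (decide (L.getD (s + c + 1) 0 - L.getD (s + c) 0 < distance - 2) ||
              decide (distance + 2 < L.getD (s + c + 1) 0 - L.getD (s + c) 0)) = true := by
            have := hgd'
            simp only [Bool.and_eq_false_iff, decide_eq_false_iff_not, not_le] at this
            simp only [Bool.or_eq_true, decide_eq_true_eq]
            omega
          have hcne : (flag && (c == 4)) = false := by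
            cases flag with
            | false => simp
            | true =>
              simp only [Bool.true_and, beq_eq_false_iff_ne]
              intro hce; exact hc4 ⟨rfl, hce⟩
          simp only [pvAStep, hidx]
          rw [hgd', hcne, hbad]
          simp
        rw [hstep]
        have hrec := pvA_run x_coord distance L (s + c + 1) 0 false acc
          (by omega) (fun h => absurd h (by omega)) (by omega) (fun t ht => absurd ht (by omega))
        rw [← hG] at hrec
        rw [show s + c + 1 + 1 = s + c + 1 + 0 + 1 from by omega]
        simp only [Nat.add_zero] at hrec
        rw [hrec]
        rw [pvRunlen_false G (s + c) hgd']
        have hcz : (c + 0 + 1) / 5 = 0 := by omega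
        rw [hcz]
        simp only [pvStaves, List.range_zero, List.map_nil, List.nil_append]
        rw [show s + c + 0 + 1 = s + c + 1 from by omega]
        rw [← pvS_fresh x_coord L G (s + c + 1)]
        simp [List.append_assoc, pvStaves]
  · -- loop finished: i = len, gap index s + c = G.length; A's post-check
    have hlen : s + c + 1 = L.length := by omega
    simp only [hi, dif_neg, not_false_iff]
    have hkG : ¬ s + c < G.length := by rw [hG, pvGoodTable_length]; omega
    rw [pvRunlen_stop G (s + c) hkG]
    rw [pvS_stop x_coord L G (s + c + 0 + 1) (by omega)]
    unfold pvAPost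
    by_cases hce : c = 4
    · subst hce
      have hfl : flag = true := hf (by omega)
      simp only [hfl, Bool.true_and]
      have hcnt : (4 + 0 + 1) / 5 = 0 + 1 := by norm_num
      rw [hcnt, pvStaves_succ]
      simp only [pvStaves, List.range_zero, List.map_nil]
      rw [show L.length - 1 = s + 4 from by omega, show L.length - 5 = s from by omega]
      rw [show L.getD s 0 + L.getD (s + 4) 0 = L.getD (s + 4) 0 + L.getD s 0 from by ring]
      simp
    · have hcne : (flag && c == 4) = false := by
        cases flag with
        | false => simp
        | true => simp only [Bool.true_and, beq_eq_false_iff_ne]; exact hce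
      simp only [hcne, Bool.false_eq_true, if_false]
      have hcz : (c + 0 + 1) / 5 = 0 := by omega
      rw [hcz]
      simp [pvStaves]
termination_by L.length - (s + c)
decreasing_by all_goals omega

-- ===== VERDICT (by name: the statement is the Claim_ definition above) =====
theorem get_staves_positions_spec : Claim_equal_get_staves_positions := by
  intro x d L _
  unfold Spec_get_staves_positions get_staves_positions get_staves_positions_alt
  by_cases h5 : L.length < 5
  · simp [h5]
  · simp only [h5, if_false]
    rw [pvBWalk_eq, List.nil_append]
    have h := pvA_run x d L 0 0
      (decide (d - 4 ≤ L.getD 1 0 - L.getD 0 0) && decide (L.getD 1 0 - L.getD 0 0 ≤ d + 4)) []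
      (by omega) (fun hh => absurd hh (by omega)) (by omega) (fun t ht => absurd ht (by omega))
    simp only [Nat.add_zero, Nat.zero_add] at h
    rw [h, List.nil_append, ← pvS_fresh x L (pvGoodTable d L) 0]
    simp only [Nat.zero_add]
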